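-- pv_equiv track=rewrite | github.com/sowiwia/IP-Algo1 | Python/simulacro.py | maxima_cantidad_primos
-- ===== SOURCE A (Python) =====
-- def divisores(n:int) -> list[int]:
--     res: list[int] = []
--     i: int = 1
--
--     while i <= n:
--         if n % i == 0:
--             res.append(i)
--         i +=1
--
--     return res
--
-- def es_primo(n:int) -> bool:
--     res: bool = True
--
--     if len(divisores(n)) != 2:
--         res = False
--
--     return res
--
-- def traspuesta(matriz: list[list[int]]) -> list[list[int]]:
--     res: list[list[int]] = []
--
--     for j in range(len(matriz[0])):
--         nueva_fila: list[int] = []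
--         for i in range(len(matriz)):
--             nueva_fila.append(matriz[i][j])
--         res.append(nueva_fila)
--
--     return res
--
-- def cant_primos_lista(lista: list[int]) -> int:
--     res: int = 0
--
--     for numero in lista:
--         if es_primo(numero):
--             res +=1
--     return res
--
-- def maxima_cantidad_primos(A: list[list[int]]) -> int:
--     columnas_a_filas: int = traspuesta(A)
--     maximo: int = 0
--
--     for fila in columnas_a_filas:
--         cantidad_primos = cant_primos_lista(fila)
--         if cantidad_primos > maximo:
--             maximo = cantidad_primos
--
--     return maximo
-- ===== SOURCE B (Python) =====
-- def divisores(n: int) -> list[int]: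
--     res: list[int] = []
--     i: int = 1
--     while i <= n:
--         if n % i == 0:
--             res.append(i)
--         i += 1
--     return res
--
-- def es_primo(n: int) -> bool:
--     res: bool = True
--     if len(divisores(n)) != 2:
--         res = False
--     return res
--
-- def maxima_cantidad_primos(A: list[list[int]]) -> int:
--     num_cols = len(A[0])
--     counts = [0] * num_cols
--     for row in A:
--         for j in range(num_cols):
--             if es_primo(row[j]):
--                 counts[j] += 1
--     return max(counts, default=0)
-- ===== Notes on version B (the rewrite author's own statement) =====
-- stated objective: alternative
-- what changed: B eliminates the intermediate transpose: one pass over the rows maintains a per-column prime-count array and returns max(counts, default=0), instead of building the transposed matrix and scanning each transposed row.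
import Mathlib
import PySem

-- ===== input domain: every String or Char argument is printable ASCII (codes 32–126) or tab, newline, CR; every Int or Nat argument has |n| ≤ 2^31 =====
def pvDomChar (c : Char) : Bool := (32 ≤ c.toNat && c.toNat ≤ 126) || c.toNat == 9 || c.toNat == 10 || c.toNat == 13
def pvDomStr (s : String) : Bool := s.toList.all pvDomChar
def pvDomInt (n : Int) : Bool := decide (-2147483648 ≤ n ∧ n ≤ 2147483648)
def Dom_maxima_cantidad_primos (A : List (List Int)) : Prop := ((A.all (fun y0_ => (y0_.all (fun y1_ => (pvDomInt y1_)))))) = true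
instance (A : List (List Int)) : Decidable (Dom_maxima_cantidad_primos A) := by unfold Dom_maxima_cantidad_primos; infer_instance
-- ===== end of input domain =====

-- B replaces the transpose-then-scan with a single pass maintaining a per-column count array; same value everywhere A returns.

-- ===== PORT A =====
def divisoresGo (n i : Int) (res : List Int) : List Int :=
  if _h : i ≤ n then
    divisoresGo n (i + 1) (if PySem.Int.mod n i = 0 then res ++ [i] else res)
  else res
termination_by (n + 1 - i).toNat
decreasing_by omega

def divisores (n : Int) : List Int := divisoresGo n 1 []

def es_primo (n : Int) : Bool := if (divisores n).length ≠ 2 then false else true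

def traspuesta (matriz : List (List Int)) : List (List Int) :=
  (PySem.List.pyRange 0 ((PySem.List.pyGetD matriz 0 []).length : Int) 1).foldl
    (fun res j =>
      res ++ [(PySem.List.pyRange 0 (matriz.length : Int) 1).foldl
        (fun nueva_fila i =>
          nueva_fila ++ [PySem.List.pyGetD (PySem.List.pyGetD matriz i []) j 0]) []]) []

def cant_primos_lista (lista : List Int) : Int :=
  lista.foldl (fun res numero => if es_primo numero then res + 1 else res) 0

def maxima_cantidad_primos (A : List (List Int)) : Int :=
  (traspuesta A).foldl
    (fun maximo fila =>
      let cantidad_primos := cant_primos_lista fila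
      if cantidad_primos > maximo then cantidad_primos else maximo) 0

-- ===== PORT B =====
def maxima_cantidad_primos_alt (A : List (List Int)) : Int :=
  (PySem.List.max?
    (A.foldl
      (fun counts row =>
        (PySem.List.pyRange 0 ((PySem.List.pyGetD A 0 []).length : Int) 1).foldl
          (fun counts j =>
            if es_primo (PySem.List.pyGetD row j 0) then
              PySem.List.pySetD counts j (PySem.List.pyGetD counts j 0 + 1)
            else counts)
          counts)
      (List.replicate (PySem.List.pyGetD A 0 []).length 0))
    (fun x => x)).getD 0

-- ===== PRECONDITION & SPEC =====
-- Pre_ excludes exactly the inputs where A raises IndexError: the empty matrix (A[0])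
-- and ragged matrices with some row shorter than the first (matriz[i][j]); B raises there too.
def Pre_maxima_cantidad_primos (A : List (List Int)) : Prop :=
  A ≠ [] ∧ ∀ r ∈ A, (A.headD []).length ≤ r.length
instance (A : List (List Int)) : Decidable (Pre_maxima_cantidad_primos A) := by
  unfold Pre_maxima_cantidad_primos; infer_instance

def pvWitness_maxima_cantidad_primos : List (List Int) := [[2, 4], [3, 5], [6, 7]]

def Spec_maxima_cantidad_primos (A : List (List Int)) (out : Int) : Prop :=
  out = maxima_cantidad_primos_alt A
instance (A : List (List Int)) (out : Int) : Decidable (Spec_maxima_cantidad_primos A out) := by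
  unfold Spec_maxima_cantidad_primos; infer_instance

-- ===== CLAIM (what is proved, stated in full; the proofs are below) =====
def Claim_equal_maxima_cantidad_primos : Prop :=
  ∀ (A : List (List Int)), Dom_maxima_cantidad_primos A →
    Pre_maxima_cantidad_primos A →
      Spec_maxima_cantidad_primos A (maxima_cantidad_primos A)

-- ===== LEMMAS AND PROOFS =====

-- the column list of A at index j
def pvCol (A : List (List Int)) (j : Nat) : List Int :=
  A.map (fun r => PySem.List.pyGetD r (j : Int) 0)

-- A's transpose as a map over column indices
theorem traspuesta_eq (A : List (List Int)) :
    traspuesta A = (List.range (PySem.List.pyGetD A 0 []).length).map (pvCol A) := by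
  unfold traspuesta
  rw [PySem.List.foldl_append_singleton_eq_map]
  simp only [List.nil_append]
  rw [PySem.List.pyRange_one 0 ((PySem.List.pyGetD A 0 []).length : Int)]
  simp only [sub_zero, Int.toNat_natCast, List.map_map]
  apply List.map_congr_left
  intro j _
  simp only [Function.comp_apply, zero_add]
  rw [PySem.List.foldl_append_singleton_eq_map]
  simp only [List.nil_append]
  unfold pvCol
  have hcomp : (fun i => PySem.List.pyGetD (PySem.List.pyGetD A i []) ((j : Nat) : Int) 0)
      = (fun r => PySem.List.pyGetD r ((j : Nat) : Int) 0) ∘ (fun i => PySem.List.pyGetD A i []) := rfl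
  rw [hcomp, ← List.map_map, PySem.List.map_pyGetD_pyRange_zero']

-- A's running max loop is foldl max
theorem foldl_gtmax (l : List (List Int)) (m : Int) :
    l.foldl (fun maximo fila =>
      let c := cant_primos_lista fila
      if c > maximo then c else maximo) m
    = l.foldl (fun maximo fila => max maximo (cant_primos_lista fila)) m := by
  induction l generalizing m with
  | nil => rfl
  | cons x t ih =>
      simp only [List.foldl_cons]
      rw [ih]
      congr 1
      by_cases h : cant_primos_lista x > m
      · simp [h, max_eq_right (le_of_lt h)]
      · simp [h, max_eq_left (not_lt.mp h)]

theorem cant_nonneg (l : List Int) : 0 ≤ cant_primos_lista l := by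
  unfold cant_primos_lista
  suffices h : ∀ a : Int, 0 ≤ a →
      0 ≤ l.foldl (fun res numero => if es_primo numero then res + 1 else res) a by
    exact h 0 le_rfl
  induction l with
  | nil => intro a ha; exact ha
  | cons x t ih =>
      intro a ha
      simp only [List.foldl_cons]
      exact ih _ (by split <;> omega)

-- Python max(l, default=0) equals foldl max 0 when all elements are nonnegative
theorem max_getD_eq_foldl (l : List Int) (h : ∀ x ∈ l, 0 ≤ x) :
    (PySem.List.max? l (fun x => x)).getD 0 = l.foldl max 0 := by
  cases l with
  | nil => rfl
  | cons x t =>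
      rw [PySem.List.max?_id_cons]
      simp only [Option.getD_some, List.foldl_cons]
      have hx : max 0 x = x := max_eq_right (h x (by simp))
      rw [hx]

-- pySetD on a map-over-range is a pointwise update
theorem pySetD_map_range (c : Nat) (g : Nat → Int) (a : Nat) (v : Int) :
    PySem.List.pySetD ((List.range c).map g) (a : Int) v
      = (List.range c).map (fun j => if j = a then v else g j) := by
  rw [PySem.List.pySetD_natCast]
  apply List.ext_getElem
  · simp
  · intro i h1 h2
    simp only [List.getElem_set, List.getElem_map, List.getElem_range]
    simp only [List.length_set, List.length_map, List.length_range] at h1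
    by_cases h : a = i
    · simp [h]
    · simp [h, Ne.symm h]

theorem pyGetD_map_range (c : Nat) (g : Nat → Int) (a : Nat) (ha : a < c) :
    PySem.List.pyGetD ((List.range c).map g) (a : Int) 0 = g a := by
  rw [PySem.List.pyGetD_natCast]
  simp [List.getD, ha]

-- B's inner loop over j ∈ range(a, c) on a state (range c).map g
theorem inner_loop (row : List Int) (c : Nat) (a : Nat) (ha : a ≤ c) (g : Nat → Int) :
    (PySem.List.pyRange (a : Int) (c : Int) 1).foldl
      (fun counts j =>
        if es_primo (PySem.List.pyGetD row j 0) then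
          PySem.List.pySetD counts j (PySem.List.pyGetD counts j 0 + 1)
        else counts)
      ((List.range c).map g)
    = (List.range c).map
        (fun j => if a ≤ j then
            (if es_primo (PySem.List.pyGetD row (j : Int) 0) then g j + 1 else g j)
          else g j) := by
  induction hind : c - a generalizing a g with
  | zero =>
      have : ¬ ((a : Int) < (c : Int)) := by omega
      rw [PySem.List.pyRange_one_eq_nil (by omega)]
      simp only [List.foldl_nil]
      apply List.map_congr_left
      intro j hj
      simp only [List.mem_range] at hj
      have : ¬ a ≤ j := by omega
      simp [this]
  | succ k ih =>
      have hlt : (a : Int) < (c : Int) := by omega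
      rw [PySem.List.pyRange_one_cons hlt]
      simp only [List.foldl_cons]
      have hstep :
          (if es_primo (PySem.List.pyGetD row (a : Int) 0) then
            PySem.List.pySetD ((List.range c).map g) (a : Int)
              (PySem.List.pyGetD ((List.range c).map g) (a : Int) 0 + 1)
          else (List.range c).map g)
          = (List.range c).map (fun j =>
              if j = a then
                (if es_primo (PySem.List.pyGetD row (a : Int) 0) then g a + 1 else g a)
              else g j) := by
        by_cases hp : es_primo (PySem.List.pyGetD row (a : Int) 0)
        · rw [if_pos hp, pyGetD_map_range c g a (by omega), pySetD_map_range]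
          apply List.map_congr_left
          intro j _
          by_cases hj : j = a
          · subst hj; simp [hp, -PySem.List.pyGetD_natCast]
          · simp [hj]
        · rw [if_neg hp]
          apply List.map_congr_left
          intro j _
          by_cases hj : j = a
          · subst hj; simp [hp, -PySem.List.pyGetD_natCast]
          · simp [hj]
      rw [hstep]
      have hcast : ((a : Int) + 1) = ((a + 1 : Nat) : Int) := by push_cast; ring
      rw [hcast, ih (a + 1) (by omega) _ (by omega)]
      apply List.map_congr_left
      intro j hj
      by_cases h1 : a + 1 ≤ j
      · have : a ≤ j := by omega
        have hne : j ≠ a := by omega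
        simp [h1, hne, this]
      · by_cases h2 : j = a
        · subst h2
          simp
        · have : ¬ a ≤ j := by omega
          simp [h1, h2, this]

-- counting primes in a list via an Int fold, cons form
theorem cant_cons (x : Int) (t : List Int) :
    cant_primos_lista (x :: t)
      = (if es_primo x then (1 : Int) else 0) + cant_primos_lista t := by
  have shift : ∀ (t : List Int) (a : Int),
      t.foldl (fun res numero => if es_primo numero then res + 1 else res) a
        = a + t.foldl (fun res numero => if es_primo numero then res + 1 else res) 0 := by
    intro t
    induction t with
    | nil => intro a; simp
    | cons y s ih =>
        intro a
        simp only [List.foldl_cons]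
        rw [ih, ih (if es_primo y then 0 + 1 else 0)]
        split <;> ring
  unfold cant_primos_lista
  simp only [List.foldl_cons]
  rw [shift t]
  split <;> ring

-- B's outer fold computes the per-column prime counts
theorem outer_loop (rows : List (List Int)) (c : Nat) (g : Nat → Int) :
    rows.foldl
      (fun counts row =>
        (PySem.List.pyRange 0 (c : Int) 1).foldl
          (fun counts j =>
            if es_primo (PySem.List.pyGetD row j 0) then
              PySem.List.pySetD counts j (PySem.List.pyGetD counts j 0 + 1)
            else counts)
          counts)
      ((List.range c).map g)
    = (List.range c).map (fun j => g j + cant_primos_lista (pvCol rows j)) := by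
  induction rows generalizing g with
  | nil =>
      simp only [List.foldl_nil]
      apply List.map_congr_left
      intro j _
      unfold pvCol cant_primos_lista
      simp
  | cons r t ih =>
      simp only [List.foldl_cons]
      have hin := inner_loop r c 0 (Nat.zero_le c) g
      simp only [Nat.cast_zero, Nat.zero_le, if_true] at hin
      rw [hin, ih]
      apply List.map_congr_left
      intro j _
      unfold pvCol
      simp only [List.map_cons]
      rw [cant_cons]
      split <;> ring

theorem foldl_cant_eq (l : List (List Int)) :
    l.foldl (fun m f => max m (cant_primos_lista f)) 0
      = (l.map cant_primos_lista).foldl max 0 := by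
  rw [List.foldl_map]

-- ===== VERDICT (by name: the statement is the Claim_ definition above) =====
theorem maxima_cantidad_primos_spec : Claim_equal_maxima_cantidad_primos := by
  intro A _ _
  unfold Spec_maxima_cantidad_primos
  unfold maxima_cantidad_primos maxima_cantidad_primos_alt
  rw [traspuesta_eq, foldl_gtmax, foldl_cant_eq]
  have hrepl : (List.replicate (PySem.List.pyGetD A 0 []).length (0 : Int))
      = (List.range (PySem.List.pyGetD A 0 []).length).map (fun _ => (0 : Int)) := by
    simp [List.map_const']
  rw [hrepl, outer_loop A (PySem.List.pyGetD A 0 []).length (fun _ => 0)]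
  rw [max_getD_eq_foldl]
  · rw [List.map_map]
    congr 1
    apply List.map_congr_left
    intro j _
    simp only [Function.comp_apply, zero_add]
  · intro x hx
    simp only [List.mem_map] at hx
    obtain ⟨j, _, hj⟩ := hx
    have := cant_nonneg (pvCol A j)
    omega
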